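-- pv_equiv track=rewrite | github.com/TanelPaal/Programming-Introductory-Course | TK/tk3/exam.py | mirror_ends
-- ===== SOURCE A (Python) =====
-- def mirror_ends(s: str) -> str:
--     """
--     Given a string, look for a mirror image (backwards) string at both the beginning and end of the given string.
--
--     In other words, zero or more characters at the very beginning of the given string,
--     and at the very end of the string in reverse order (possibly overlapping).
--
--     For example, the string "abXYZba" has the mirror end "ab".
--
--     mirror_ends("abXYZba") → "ab"
--     mirror_ends("abca") → "a"
--     mirror_ends("aba") → "aba"
--
--     :param s: String
--     :return: Mirror image string
--     """
--     mirror = ''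
--     for i in range(len(s)):
--         if s[i] == s[-i-1]:
--             mirror += s[i]
--         else:
--             break
--     return mirror
-- ===== SOURCE B (Python) =====
-- def mirror_ends(s: str) -> str:
--     """Reverse-then-match decomposition: count matching leading pairs of s and
--     its reverse, return that prefix as a slice."""
--     rev = s[::-1]
--     n = 0
--     for a, b in zip(s, rev):
--         if a != b:
--             break
--         n += 1
--     return s[:n]
-- ===== Notes on version B (the rewrite author's own statement) =====
-- stated objective: idiomatic
-- what changed: B builds the reversed string once and counts matching leading pairs of (s, reversed s) via zip, returning the prefix as a slice, instead of A's index loop with negative indexing s[-i-1] and character-by-character string accumulation.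
import Mathlib
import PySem

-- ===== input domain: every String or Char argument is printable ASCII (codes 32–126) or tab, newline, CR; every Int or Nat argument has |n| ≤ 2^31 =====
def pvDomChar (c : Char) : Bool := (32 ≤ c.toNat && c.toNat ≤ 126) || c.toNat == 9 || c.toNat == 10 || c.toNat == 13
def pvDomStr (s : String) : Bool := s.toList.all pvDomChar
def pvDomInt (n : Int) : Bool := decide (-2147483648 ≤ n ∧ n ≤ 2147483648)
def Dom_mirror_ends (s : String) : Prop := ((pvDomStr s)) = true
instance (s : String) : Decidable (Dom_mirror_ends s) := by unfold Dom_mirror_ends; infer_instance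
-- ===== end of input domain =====

-- B replaces A's negative-index accumulation loop by reverse-then-count-matching-pairs and a prefix slice (idiomatic decomposition).


-- ===== PORT A =====
-- A's loop: for i in range(len(s)): if s[i] == s[-i-1]: mirror += s[i] else: break
def mirrorGoA (cs : List Char) (i : Nat) (mirror : List Char) : List Char :=
  if i < cs.length then
    match PySem.List.pyGet? cs (i : Int), PySem.List.pyGet? cs (-(i : Int) - 1) with
    | some a, some b => if a = b then mirrorGoA cs (i + 1) (mirror ++ [a]) else mirror
    | _, _ => mirror
  else mirror
termination_by cs.length - i

def mirror_ends (s : String) : String :=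
  String.ofList (mirrorGoA s.toList 0 [])

-- ===== PORT B =====
-- B's loop: n = 0; for a, b in zip(s, rev): if a != b: break; n += 1
def matchLen : List Char → List Char → Nat
  | a :: as, b :: bs => if a ≠ b then 0 else matchLen as bs + 1
  | _, _ => 0

def mirror_ends_alt (s : String) : String :=
  let cs := s.toList
  let rev := cs.reverse                 -- rev = s[::-1]
  String.ofList (cs.take (matchLen cs rev)) -- s[:n] with 0 ≤ n ≤ len(s) is take n

-- ===== PRECONDITION & SPEC =====
def Spec_mirror_ends (s : String) (out : String) : Prop := out = mirror_ends_alt s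
instance (s : String) (out : String) : Decidable (Spec_mirror_ends s out) := by unfold Spec_mirror_ends; infer_instance

-- ===== CLAIM (what is proved, stated in full; the proofs are below) =====
def Claim_equal_mirror_ends : Prop := ∀ (s : String), Dom_mirror_ends s → Spec_mirror_ends s (mirror_ends s)

-- ===== LEMMAS AND PROOFS =====

theorem mirrorGoA_eq (cs : List Char) (i : Nat) (mirror : List Char) (hi : i ≤ cs.length) :
    mirrorGoA cs i mirror =
      mirror ++ (cs.drop i).take (matchLen (cs.drop i) (cs.reverse.drop i)) := by
  by_cases h : i < cs.length
  · have hrev : i < cs.reverse.length := by simpa using h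
    have hd1 : cs.drop i = cs[i] :: cs.drop (i + 1) := List.drop_eq_getElem_cons h
    have hd2 : cs.reverse.drop i = cs.reverse[i] :: cs.reverse.drop (i + 1) :=
      List.drop_eq_getElem_cons hrev
    have hg1 : PySem.List.pyGet? cs (i : Int) = some cs[i] := by
      simp [PySem.List.pyGet?_natCast, List.getElem?_eq_getElem h]
    have hneg : (-(i : Int) - 1) = -(((i + 1 : Nat)) : Int) := by push_cast; ring
    have hg2 : PySem.List.pyGet? cs (-(i : Int) - 1) = some cs.reverse[i] := by
      rw [hneg, PySem.List.pyGet?_neg_natCast cs (i + 1) (by omega) (by omega)]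
      have : cs.length - (i + 1) < cs.length := by omega
      rw [List.getElem?_eq_getElem this]
      congr 1
      rw [List.getElem_reverse]
      congr 1
      omega
    rw [mirrorGoA, if_pos h, hg1, hg2]
    have hred : (match some cs[i], some cs.reverse[i] with
        | some a, some b => if a = b then mirrorGoA cs (i + 1) (mirror ++ [a]) else mirror
        | _, _ => mirror) =
        if cs[i] = cs.reverse[i] then mirrorGoA cs (i + 1) (mirror ++ [cs[i]]) else mirror := rfl
    rw [hred]
    by_cases heq : cs[i] = cs.reverse[i]
    · rw [if_pos heq, mirrorGoA_eq cs (i + 1) _ (by omega)]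
      rw [hd1, hd2, matchLen, if_neg (by simpa using heq)]
      simp [heq, List.append_assoc]
    · rw [if_neg heq, hd1, hd2, matchLen, if_pos (by simpa using heq)]
      simp
  · have : i = cs.length := by omega
    subst this
    rw [mirrorGoA]
    simp [matchLen]
termination_by cs.length - i

-- ===== VERDICT (by name: the statement is the Claim_ definition above) =====
theorem mirror_ends_spec : Claim_equal_mirror_ends := by
  intro s _
  unfold Spec_mirror_ends mirror_ends mirror_ends_alt
  rw [mirrorGoA_eq s.toList 0 [] (by omega)]
  simp
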